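-- pv_equiv track=rewrite | github.com/Kenseimk/keiba-agent | backtest_marks.py | assign_marks
-- ===== SOURCE A (Python) =====
-- N_DELTA      = 4   # △の頭数（5位〜8位）
--
-- def assign_marks(results: list) -> dict:
--     """
--     U_score 降順の results から馬名→印 の辞書を返す。
--     ◎=1位, ○=2位, ▲=3位, ☆=4位, △=5〜(4+N_DELTA)位
--     """
--     marks = {}
--     for i, r in enumerate(results):
--         name = r['name']
--         if i == 0:
--             marks[name] = '◎'
--         elif i == 1:
--             marks[name] = '○'
--         elif i == 2:
--             marks[name] = '▲'
--         elif i == 3: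
--             marks[name] = '☆'
--         elif i < 4 + N_DELTA:
--             marks[name] = '△'
--         else:
--             marks[name] = ''
--     return marks
-- ===== SOURCE B (Python) =====
-- N_DELTA = 4   # same module constant as A
--
-- MARKS = ['◎', '○', '▲', '☆'] + ['△'] * N_DELTA
--
-- def assign_marks(results: list) -> dict:
--     """Marks table instead of an if/elif ladder: one lookup per row."""
--     marks = {}
--     for i, r in enumerate(results):
--         marks[r['name']] = MARKS[i] if i < len(MARKS) else ''
--     return marks
-- ===== Notes on version B (the rewrite author's own statement) =====
-- stated objective: simpler
-- what changed: Replaces the six-way if/elif ladder with a precomputed marks table indexed by position (table lookup with '' past the end), keeping the same single enumerate pass and dict building.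
import Mathlib
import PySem

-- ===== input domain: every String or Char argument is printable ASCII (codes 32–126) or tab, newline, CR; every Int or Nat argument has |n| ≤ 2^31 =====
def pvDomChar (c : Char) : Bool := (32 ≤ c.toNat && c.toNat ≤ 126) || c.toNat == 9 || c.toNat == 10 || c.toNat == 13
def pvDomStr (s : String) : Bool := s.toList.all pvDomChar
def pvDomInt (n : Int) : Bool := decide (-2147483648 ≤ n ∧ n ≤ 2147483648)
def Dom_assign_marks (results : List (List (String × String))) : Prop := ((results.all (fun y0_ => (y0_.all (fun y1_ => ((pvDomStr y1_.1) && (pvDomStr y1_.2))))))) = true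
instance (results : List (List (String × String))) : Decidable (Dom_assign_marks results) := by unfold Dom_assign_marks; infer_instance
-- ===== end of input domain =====

-- B replaces A's six-way if/elif ladder with a precomputed marks table indexed by position (same single pass, same dict building); objective: simpler.


-- ===== PORT A =====
-- r['name'] on the assoc-list dict r: first-match lookup, total form used under Pre_ (key present)
def pvName (r : List (String × String)) : String := (PySem.Dict.mk r).getD "name" ""

def assign_marks (results : List (List (String × String))) : List (String × String) :=
  ((PySem.List.enumerate results).foldl
    (fun (marks : PySem.Dict String String) p =>
      let name := pvName p.2
      if p.1 = 0 then marks.insert name "◎"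
      else if p.1 = 1 then marks.insert name "○"
      else if p.1 = 2 then marks.insert name "▲"
      else if p.1 = 3 then marks.insert name "☆"
      else if p.1 < 4 + 4 then marks.insert name "△"
      else marks.insert name "") PySem.Dict.empty).items

-- ===== PORT B =====
def marksTable : List String := ["◎", "○", "▲", "☆"] ++ List.replicate 4 "△"

def assign_marks_alt (results : List (List (String × String))) : List (String × String) :=
  ((PySem.List.enumerate results).foldl
    (fun (marks : PySem.Dict String String) p =>
      marks.insert (pvName p.2)
        (if p.1 < PySem.List.len marksTable then PySem.List.pyGetD marksTable p.1 "" else ""))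
    PySem.Dict.empty).items

-- ===== PRECONDITION & SPEC =====
-- Pre_ excludes rows without a 'name' key, on which Python A raises KeyError.
def Pre_assign_marks (results : List (List (String × String))) : Prop :=
  ∀ r ∈ results, "name" ∈ r.map Prod.fst
instance (results : List (List (String × String))) : Decidable (Pre_assign_marks results) := by unfold Pre_assign_marks; infer_instance

def pvWitness_assign_marks : (List (List (String × String))) :=
  [[("name", "A")], [("name", "B")], [("name", "C")]]

def Spec_assign_marks (results : List (List (String × String))) (out : List (String × String)) : Prop := out = assign_marks_alt results
instance (results : List (List (String × String))) (out : List (String × String)) : Decidable (Spec_assign_marks results out) := by unfold Spec_assign_marks; infer_instance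

-- ===== CLAIM (what is proved, stated in full; the proofs are below) =====
def Claim_equal_assign_marks : Prop := ∀ (results : List (List (String × String))), Dom_assign_marks results → Pre_assign_marks results → Spec_assign_marks results (assign_marks results)

-- ===== LEMMAS AND PROOFS =====

-- the if/elif ladder at a non-negative index equals the table lookup
lemma mark_ladder_eq_table (k : Nat) :
    (if (k : Int) = 0 then "◎"
     else if (k : Int) = 1 then "○"
     else if (k : Int) = 2 then "▲"
     else if (k : Int) = 3 then "☆"
     else if (k : Int) < 4 + 4 then "△"
     else "") =
    (if (k : Int) < PySem.List.len marksTable then PySem.List.pyGetD marksTable (k : Int) "" else "") := by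
  match k with
  | 0 => decide
  | 1 => decide
  | 2 => decide
  | 3 => decide
  | 4 => decide
  | 5 => decide
  | 6 => decide
  | 7 => decide
  | (n + 8) =>
    push_cast
    rw [if_neg (by omega), if_neg (by omega), if_neg (by omega), if_neg (by omega),
        if_neg (by omega)]
    have hlen : PySem.List.len marksTable = 8 := by decide
    rw [hlen, if_neg (by omega)]

-- ===== VERDICT (by name: the statement is the Claim_ definition above) =====
theorem assign_marks_spec : Claim_equal_assign_marks := by
  intro results _ _
  unfold Spec_assign_marks assign_marks assign_marks_alt
  congr 1
  apply PySem.List.foldl_congr_mem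
  intro acc p hp
  rcases (PySem.List.mem_enumerate_iff _ _ _).mp hp with ⟨k, hk, rfl⟩
  simp only [Int.zero_add]
  have := mark_ladder_eq_table k
  split_ifs at this ⊢ <;> simp_all
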